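-- pv_equiv track=rewrite | github.com/randolchance/PythonProjects | ProjectEulerSolutions/PE150/PE150-SearchingTriangleForMinSubTriangle.py | makeTri
-- ===== SOURCE A (Python) =====
-- def makeTri(size):
--     new_tri = []
--     t = 0
--     K = -2**19
--     a = 615949
--     b = 797807
--     z = 2**20
--     for n in range(size):
--         new_row = []
--         for c in range(n+1):
--             t = (a*t+b) % z
--             s = t + K
--             new_row.append(s)
--         new_tri.append(new_row)
--     return(new_tri)
-- ===== SOURCE B (Python) =====
-- def makeTri(size):
--     # Two-pass: generate the flat LCG stream once, then reshape into triangle rows.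
--     K = -2**19
--     a = 615949
--     b = 797807
--     z = 2**20
--     total = size * (size + 1) // 2 if size > 0 else 0
--     t = 0
--     flat = []
--     for _ in range(total):
--         t = (a * t + b) % z
--         flat.append(t + K)
--     return [flat[n * (n + 1) // 2:(n + 1) * (n + 2) // 2] for n in range(size)]
-- ===== Notes on version B (the rewrite author's own statement) =====
-- stated objective: alternative
-- what changed: A fills the triangle with nested loops advancing the LCG in place; B first generates the whole LCG stream in one flat loop and then reshapes it into rows by arithmetic slicing (row n = flat[n(n+1)/2:(n+1)(n+2)/2]).
import Mathlib
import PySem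

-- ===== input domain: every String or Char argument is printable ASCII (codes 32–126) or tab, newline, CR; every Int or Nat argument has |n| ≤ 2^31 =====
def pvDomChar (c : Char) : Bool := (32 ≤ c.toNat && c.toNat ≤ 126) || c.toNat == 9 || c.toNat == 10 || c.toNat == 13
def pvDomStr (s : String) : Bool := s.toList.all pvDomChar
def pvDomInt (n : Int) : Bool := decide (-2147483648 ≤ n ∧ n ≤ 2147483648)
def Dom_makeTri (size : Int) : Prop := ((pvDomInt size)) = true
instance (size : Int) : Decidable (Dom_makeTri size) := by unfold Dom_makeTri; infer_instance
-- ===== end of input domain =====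

-- B replaces A's nested row-by-row loops by one flat LCG-stream loop followed by
-- arithmetic reshaping into rows (an alternative decomposition, not claimed faster).

-- ===== PORT A =====
-- A: nested loops, the LCG state t threads through both, each row appended as built.
def makeTri (size : Int) : List (List Int) :=
  ((PySem.List.pyRange 0 size 1).foldl
    (fun (st : Int × List (List Int)) n =>
      let inner := (PySem.List.pyRange 0 (n + 1) 1).foldl
        (fun (st2 : Int × List Int) _c =>
          let t := PySem.Int.mod (615949 * st2.1 + 797807) 1048576
          (t, st2.2 ++ [t + -524288]))
        (st.1, ([] : List Int))
      (inner.1, st.2 ++ [inner.2]))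
    (0, ([] : List (List Int)))).2

-- ===== PORT B =====
-- B: one flat loop producing total = size*(size+1)//2 stream values, then slicing.
def makeTri_alt (size : Int) : List (List Int) :=
  let total : Int := if size > 0 then PySem.Int.floordiv (size * (size + 1)) 2 else 0
  let flat : List Int := ((PySem.List.pyRange 0 total 1).foldl
    (fun (st2 : Int × List Int) _c =>
      let t := PySem.Int.mod (615949 * st2.1 + 797807) 1048576
      (t, st2.2 ++ [t + -524288]))
    (0, ([] : List Int))).2
  (PySem.List.pyRange 0 size 1).map (fun n =>
    PySem.List.slice flat (some (PySem.Int.floordiv (n * (n + 1)) 2))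
      (some (PySem.Int.floordiv ((n + 1) * (n + 2)) 2)))

-- ===== PRECONDITION & SPEC =====
def Spec_makeTri (size : Int) (out : List (List Int)) : Prop := out = makeTri_alt size
instance (size : Int) (out : List (List Int)) : Decidable (Spec_makeTri size out) := by unfold Spec_makeTri; infer_instance

-- ===== CLAIM (what is proved, stated in full; the proofs are below) =====
def Claim_equal_makeTri : Prop := ∀ (size : Int), Dom_makeTri size → Spec_makeTri size (makeTri size)

-- ===== LEMMAS AND PROOFS =====

-- the LCG step, its iterate, the stream value at index k, and the triangular number
def pvF (t : Int) : Int := PySem.Int.mod (615949 * t + 797807) 1048576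
def pvS : Nat → Int
  | 0 => 0
  | k + 1 => pvF (pvS k)
def pvV (k : Nat) : Int := pvS (k + 1) + -524288
def pvT (n : Nat) : Nat := n * (n + 1) / 2

lemma pvT_succ (n : Nat) : pvT (n + 1) = pvT n + (n + 1) := by
  unfold pvT
  have h : (n + 1) * (n + 2) = n * (n + 1) + 2 * (n + 1) := by ring
  rw [h, Nat.add_mul_div_left _ _ (by norm_num : 0 < 2)]

lemma pvT_mono {a b : Nat} (h : a ≤ b) : pvT a ≤ pvT b :=
  Nat.div_le_div_right (Nat.mul_le_mul h (by omega))

-- the element-ignoring value-appending fold (shared shape of A's inner loop and B's flat loop)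
lemma pv_chunk {α : Type} (l : List α) (j : Nat) (acc : List Int) :
    l.foldl
      (fun (st2 : Int × List Int) _c =>
        (PySem.Int.mod (615949 * st2.1 + 797807) 1048576,
         st2.2 ++ [PySem.Int.mod (615949 * st2.1 + 797807) 1048576 + -524288]))
      (pvS j, acc)
    = (pvS (j + l.length), acc ++ (List.range l.length).map (fun i => pvV (j + i))) := by
  induction l generalizing j acc with
  | nil => simp
  | cons x xs ih =>
    have hstep : ((PySem.Int.mod (615949 * pvS j + 797807) 1048576,
        acc ++ [PySem.Int.mod (615949 * pvS j + 797807) 1048576 + -524288]) : Int × List Int)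
        = (pvS (j + 1), acc ++ [pvV j]) := by
      simp [pvS, pvF, pvV]
    simp only [List.foldl_cons, hstep, ih (j + 1) (acc ++ [pvV j]), List.length_cons]
    rw [Prod.mk.injEq]
    refine ⟨by congr 1; omega, ?_⟩
    rw [List.range_succ_eq_map]
    simp [List.map_map, Function.comp_def]
    intro a _
    congr 1
    omega

lemma pyRange_nonpos {s : Int} (h : s ≤ 0) : PySem.List.pyRange 0 s 1 = [] := by
  simp [PySem.List.pyRange]
  intro h'
  omega

-- A's outer fold characterised
lemma pvA (m : Nat) :
    (PySem.List.pyRange 0 (m : Int) 1).foldl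
      (fun (st : Int × List (List Int)) n =>
        ((((PySem.List.pyRange 0 (n + 1) 1).foldl
          (fun (st2 : Int × List Int) _c =>
            (PySem.Int.mod (615949 * st2.1 + 797807) 1048576,
             st2.2 ++ [PySem.Int.mod (615949 * st2.1 + 797807) 1048576 + -524288]))
          (st.1, ([] : List Int))).1),
         st.2 ++ [((PySem.List.pyRange 0 (n + 1) 1).foldl
          (fun (st2 : Int × List Int) _c =>
            (PySem.Int.mod (615949 * st2.1 + 797807) 1048576,
             st2.2 ++ [PySem.Int.mod (615949 * st2.1 + 797807) 1048576 + -524288]))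
          (st.1, ([] : List Int))).2]))
      (0, ([] : List (List Int)))
    = (pvS (pvT m),
       (List.range m).map (fun n => (List.range (n + 1)).map (fun i => pvV (pvT n + i)))) := by
  induction m with
  | zero => simp [pvT, pvS]
  | succ m ih =>
    have hr : PySem.List.pyRange 0 ((m + 1 : Nat) : Int) 1
        = PySem.List.pyRange 0 (m : Int) 1 ++ [(m : Int)] := by
      have h1 : ((m + 1 : Nat) : Int) = (m : Int) + 1 := by push_cast; ring
      rw [h1, PySem.List.pyRange_one_succ_right (by positivity)]
    rw [hr, List.foldl_append, ih]
    simp only [List.foldl_cons, List.foldl_nil]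
    rw [pv_chunk (PySem.List.pyRange 0 ((m : Int) + 1) 1) (pvT m) []]
    have hlen : (PySem.List.pyRange 0 ((m : Int) + 1) 1).length = m + 1 := by
      have h1 : ((m : Int) + 1) = ((m + 1 : Nat) : Int) := by push_cast; ring
      rw [h1, PySem.List.pyRange_zero_natCast]
      simp
    rw [hlen, Prod.mk.injEq]
    constructor
    · rw [pvT_succ]
    · simp [List.range_succ]

-- B's flat list characterised
lemma pvB_flat (m : Nat) :
    ((PySem.List.pyRange 0 ((pvT m : Nat) : Int) 1).foldl
      (fun (st2 : Int × List Int) _c =>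
        (PySem.Int.mod (615949 * st2.1 + 797807) 1048576,
         st2.2 ++ [PySem.Int.mod (615949 * st2.1 + 797807) 1048576 + -524288]))
      (0, ([] : List Int))).2 = (List.range (pvT m)).map pvV := by
  rw [show ((0 : Int), ([] : List Int)) = (pvS 0, ([] : List Int)) from rfl,
    pv_chunk, PySem.List.pyRange_zero_natCast]
  simp

-- a slice of the flat stream is exactly row n
lemma pv_slice_row (m n : Nat) (h : n < m) :
    PySem.List.slice ((List.range (pvT m)).map pvV) (some ((pvT n : Nat) : Int))
        (some ((pvT (n + 1) : Nat) : Int))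
      = (List.range (n + 1)).map (fun i => pvV (pvT n + i)) := by
  rw [PySem.List.slice_natCast]
  have hsucc := pvT_succ n
  have hle : pvT (n + 1) ≤ pvT m := pvT_mono h
  apply List.ext_getElem
  · simp only [List.length_take, List.length_drop, List.length_map, List.length_range]
    omega
  · intro i h1 h2
    simp only [List.getElem_take, List.getElem_drop, List.getElem_map, List.getElem_range]

theorem pv_main (size : Int) : makeTri size = makeTri_alt size := by
  by_cases h : 0 < size
  · obtain ⟨m, hm⟩ : ∃ m : Nat, size = (m : Int) :=
      ⟨size.toNat, (Int.toNat_of_nonneg (le_of_lt h)).symm⟩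
    subst hm
    simp only [makeTri, makeTri_alt, gt_iff_lt, h, if_true]
    have htot : PySem.Int.floordiv ((m : Int) * ((m : Int) + 1)) 2 = ((pvT m : Nat) : Int) := by
      rw [show (m : Int) * ((m : Int) + 1) = ((m * (m + 1) : Nat) : Int) by push_cast; ring]
      exact_mod_cast PySem.Int.floordiv_natCast (m * (m + 1)) 2
    rw [pvA, htot, pvB_flat, PySem.List.pyRange_zero_natCast, List.map_map]
    apply List.map_congr_left
    intro n hn
    simp only [Function.comp]
    have h1 : PySem.Int.floordiv ((n : Int) * ((n : Int) + 1)) 2 = ((pvT n : Nat) : Int) := by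
      rw [show (n : Int) * ((n : Int) + 1) = ((n * (n + 1) : Nat) : Int) by push_cast; ring]
      exact_mod_cast PySem.Int.floordiv_natCast (n * (n + 1)) 2
    have h2 : PySem.Int.floordiv (((n : Int) + 1) * ((n : Int) + 2)) 2
        = ((pvT (n + 1) : Nat) : Int) := by
      rw [show ((n : Int) + 1) * ((n : Int) + 2) = (((n + 1) * (n + 2) : Nat) : Int) by
        push_cast; ring]
      exact_mod_cast PySem.Int.floordiv_natCast ((n + 1) * (n + 2)) 2
    rw [h1, h2, pv_slice_row m n (List.mem_range.mp hn)]
  · have hs : size ≤ 0 := by omega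
    simp only [makeTri, makeTri_alt, gt_iff_lt, h, if_false]
    simp [pyRange_nonpos hs]

-- ===== VERDICT (by name: the statement is the Claim_ definition above) =====
theorem makeTri_spec : Claim_equal_makeTri := by
  intro size _
  exact pv_main size
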